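-- pv_equiv track=rewrite | github.com/saurav-samantray/html-content-extractor | NLP-RetailSingularity.py | getTheRelevantWords
-- ===== SOURCE A (Python) =====
-- def getTheRelevantWords(words,documents,nameOfRetailer):
--     mapOfWords = dict.fromkeys(words,0)
--     words = set(words)
--     for i in words:
--         for j in documents:
--             if i in j:
--                 mapOfWords[i] += 1
--     processedDict = {k: v for k, v in sorted(mapOfWords.items(), key=lambda item: item[1], reverse= True)}
--     return [*processedDict]
-- ===== SOURCE B (Python) =====
-- def getTheRelevantWords(words, documents, nameOfRetailer):
--     # bucket sort by document-count: buckets[c] holds the distinct words (first-occurrence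
--     # order) contained in exactly c documents; emit buckets from highest count down
--     buckets = [[] for _ in range(len(documents) + 1)]
--     for w in dict.fromkeys(words):
--         c = 0
--         for d in documents:
--             if w in d:
--                 c += 1
--         buckets[c].append(w)
--     out = []
--     for b in reversed(buckets):
--         out.extend(b)
--     return out
-- ===== Notes on version B (the rewrite author's own statement) =====
-- stated objective: alternative
-- what changed: B drops the dict and Python's comparison sort: it counts each distinct word's containing documents once and places the word into a count-indexed bucket, then emits the buckets from the highest count down (stable bucket sort), replacing A's set/dict bookkeeping and sorted(..., reverse=True).
import Mathlib
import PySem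

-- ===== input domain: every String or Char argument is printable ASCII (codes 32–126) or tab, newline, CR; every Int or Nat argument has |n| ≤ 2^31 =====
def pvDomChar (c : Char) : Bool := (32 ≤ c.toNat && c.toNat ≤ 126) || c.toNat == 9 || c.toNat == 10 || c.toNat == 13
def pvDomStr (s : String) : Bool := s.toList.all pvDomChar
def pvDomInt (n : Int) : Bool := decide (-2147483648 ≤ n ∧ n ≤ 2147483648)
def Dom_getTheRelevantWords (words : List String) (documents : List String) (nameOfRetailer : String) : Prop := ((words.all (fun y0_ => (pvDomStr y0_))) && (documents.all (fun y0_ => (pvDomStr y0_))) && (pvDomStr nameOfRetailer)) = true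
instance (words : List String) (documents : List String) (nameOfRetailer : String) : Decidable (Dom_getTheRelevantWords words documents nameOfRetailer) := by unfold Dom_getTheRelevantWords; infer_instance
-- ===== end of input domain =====

-- B replaces A's per-word dict counting + sorted() by a single pass into count-indexed
-- buckets (bucket sort), flattened from the highest count down; objective: alternative.

-- ===== PORT A =====
def getTheRelevantWords (words : List String) (documents : List String) (nameOfRetailer : String) : List String :=
  -- mapOfWords = dict.fromkeys(words, 0)
  let mapOfWords : PySem.Dict String Int :=
    words.foldl (fun d w => d.insert w 0) PySem.Dict.empty
  -- words = set(words); the loop's effect does not depend on set-iteration order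
  -- (each key is incremented independently), so folding in first-occurrence order is exact
  let wordsSet : PySem.Set String := PySem.Set.ofList words
  let mapOfWords := wordsSet.foldl (fun d i =>
      documents.foldl (fun d j =>
        if PySem.Str.isIn i j then d.insert i (d.getD i 0 + 1) else d) d) mapOfWords
  let processedDict := PySem.List.sorted mapOfWords.items (fun item => item.2) true
  processedDict.map (fun p => p.1)

-- ===== PORT B =====
-- c = 0; for d in documents: if w in d: c += 1
def pvCount (documents : List String) (w : String) : Int :=
  documents.foldl (fun c d => if PySem.Str.isIn w d then c + 1 else c) 0

def getTheRelevantWords_alt (words : List String) (documents : List String) (nameOfRetailer : String) : List String :=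
  let order := PySem.List.dedup words
  let buckets : List (List String) := (List.range (documents.length + 1)).map (fun _ => [])
  let buckets := order.foldl (fun bs w =>
      PySem.List.pySetD bs (pvCount documents w)
        (PySem.List.pyGetD bs (pvCount documents w) [] ++ [w])) buckets
  buckets.reverse.foldl (fun out b => out ++ b) []

-- ===== PRECONDITION & SPEC =====
def Spec_getTheRelevantWords (words : List String) (documents : List String) (nameOfRetailer : String) (out : List String) : Prop := out = getTheRelevantWords_alt words documents nameOfRetailer
instance (words : List String) (documents : List String) (nameOfRetailer : String) (out : List String) : Decidable (Spec_getTheRelevantWords words documents nameOfRetailer out) := by unfold Spec_getTheRelevantWords; infer_instance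

-- ===== CLAIM (what is proved, stated in full; the proofs are below) =====
def Claim_equal_getTheRelevantWords : Prop := ∀ (words : List String) (documents : List String) (nameOfRetailer : String), Dom_getTheRelevantWords words documents nameOfRetailer → Spec_getTheRelevantWords words documents nameOfRetailer (getTheRelevantWords words documents nameOfRetailer)

-- ===== LEMMAS AND PROOFS =====

-- number of documents containing w, as a natural number
def pvCntN (documents : List String) (w : String) : ℕ :=
  documents.countP (fun j => PySem.Str.isIn w j)

lemma pvCount_eq (documents : List String) (w : String) :
    pvCount documents w = (pvCntN documents w : Int) := by
  suffices h : ∀ (docs : List String) (a : Int),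
      docs.foldl (fun c d => if PySem.Str.isIn w d then c + 1 else c) a
        = a + (docs.countP (fun j => PySem.Str.isIn w j) : Int) by
    simpa [pvCount, pvCntN] using h documents 0
  intro docs
  induction docs with
  | nil => intro a; simp
  | cons j t ih =>
    intro a
    simp only [List.foldl_cons, ih, List.countP_cons]
    by_cases hj : PySem.Str.isIn w j = true <;>
      simp only [hj, if_true, if_false, Bool.false_eq_true] <;> push_cast <;> omega

lemma pvCntN_le (documents : List String) (w : String) :
    pvCntN documents w ≤ documents.length := List.countP_le_length

-- the common canonical result: distinct words grouped by document count, highest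
-- count first, first-occurrence order inside a group
def pvCanon (words documents : List String) : List String :=
  (List.range (documents.length + 1)).reverse.flatMap
    (fun (c : ℕ) => (PySem.Set.ofList words).filter (fun w => pvCntN documents w = c))

lemma insertBy_append_of_not {α : Type} (b : α → α → Bool) (x : α) (A B : List α)
    (hA : ∀ a ∈ A, b x a = false) :
    PySem.List.insertBy b x (A ++ B) = A ++ PySem.List.insertBy b x B := by
  induction A with
  | nil => simp
  | cons a t ih =>
    have ha : b x a = false := hA a (by simp)
    simp only [List.cons_append]
    rw [show PySem.List.insertBy b x (a :: (t ++ B)) = if b x a then x :: a :: (t++B) else a :: PySem.List.insertBy b x (t++B) from rfl]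
    simp [ha, ih (fun y hy => hA y (by simp [hy]))]

-- Python's stable sort with reverse=True, for int keys drawn from {0,…,n-1}:
-- buckets of equal keys, highest key first, original order inside a bucket
lemma sorted_rev_buckets {α : Type} (key : α → Int) (n : ℕ) (xs : List α)
    (h : ∀ x ∈ xs, ∃ c : ℕ, c < n ∧ key x = (c : Int)) :
    PySem.List.sorted xs key true
      = (List.range n).reverse.flatMap (fun (c : ℕ) => xs.filter (fun x => key x = (c : Int))) := by
  induction xs using List.reverseRecOn with
  | nil =>
    rw [PySem.List.sorted_rev_eq_foldl_insertBy]
    simp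
  | append_singleton ys x ih =>
    obtain ⟨c0, hc0n, hkx⟩ := h x (by simp)
    have ihe := ih (fun y hy => h y (by simp [hy]))
    have hstep : PySem.List.sorted (ys ++ [x]) key true
        = PySem.List.insertBy (fun a b => decide (key b < key a)) x (PySem.List.sorted ys key true) := by
      rw [PySem.List.sorted_rev_eq_foldl_insertBy, PySem.List.sorted_rev_eq_foldl_insertBy,
        List.foldl_append]
      rfl
    rw [hstep, ihe]
    obtain ⟨m, rfl⟩ : ∃ m, n = (c0+1)+m := ⟨n - (c0+1), by omega⟩
    rw [List.range_add, List.reverse_append, List.flatMap_append, List.flatMap_append,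
      show (c0:ℕ)+1 = Nat.succ c0 from rfl, List.range_succ, List.reverse_append,
      List.flatMap_append]
    simp only [List.reverse_singleton, List.flatMap_cons, List.flatMap_nil, List.append_nil]
    set HIidx := ((List.range m).map (fun k => c0 + 1 + k)).reverse with hHI
    set LOidx := (List.range c0).reverse with hLO
    have hHImem : ∀ c ∈ HIidx, c0 < c := by
      intro c hc
      simp only [hHI, List.mem_reverse, List.mem_map, List.mem_range] at hc
      obtain ⟨k, _, rfl⟩ := hc; omega
    have hLOmem : ∀ c ∈ LOidx, c < c0 := by
      intro c hc
      simp only [hLO, List.mem_reverse, List.mem_range] at hc; exact hc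
    have hfiltx : ∀ c : ℕ, c ≠ c0 → (List.filter (fun y => decide (key y = (c:Int))) [x]) = [] := by
      intro c hne
      have hnk : ¬ (key x = (c:Int)) := by
        rw [hkx]; exact_mod_cast fun h' => hne (Nat.cast_injective h').symm
      simp [hnk]
    have hHIeq : HIidx.flatMap (fun (c : ℕ) => (ys ++ [x]).filter (fun y => key y = (c:Int)))
        = HIidx.flatMap (fun (c : ℕ) => ys.filter (fun y => key y = (c:Int))) := by
      apply List.flatMap_congr
      intro c hc
      rw [List.filter_append, hfiltx c (by have := hHImem c hc; omega), List.append_nil]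
    have hLOeq : LOidx.flatMap (fun (c : ℕ) => (ys ++ [x]).filter (fun y => key y = (c:Int)))
        = LOidx.flatMap (fun (c : ℕ) => ys.filter (fun y => key y = (c:Int))) := by
      apply List.flatMap_congr
      intro c hc
      rw [List.filter_append, hfiltx c (by have := hLOmem c hc; omega), List.append_nil]
    have hmid : (ys ++ [x]).filter (fun y => key y = ((c0:ℕ):Int))
        = ys.filter (fun y => key y = ((c0:ℕ):Int)) ++ [x] := by
      rw [List.filter_append]
      simp [hkx]
    simp only [List.flatMap_append, List.flatMap_cons, List.flatMap_nil, List.append_nil]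
    rw [hHIeq, hLOeq, hmid]
    rw [← List.append_assoc]
    rw [insertBy_append_of_not]
    · have hLOlist : PySem.List.insertBy (fun a b => decide (key b < key a)) x
          (LOidx.flatMap (fun (c : ℕ) => ys.filter (fun y => key y = (c:Int))))
          = x :: LOidx.flatMap (fun (c : ℕ) => ys.filter (fun y => key y = (c:Int))) := by
        cases hLE : LOidx.flatMap (fun (c : ℕ) => ys.filter (fun y => key y = (c:Int))) with
        | nil => rfl
        | cons y t =>
          have hy : y ∈ LOidx.flatMap (fun (c : ℕ) => ys.filter (fun y => key y = (c:Int))) := by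
            rw [hLE]; simp
          obtain ⟨c, hc, hyf⟩ := List.mem_flatMap.mp hy
          have hyk : key y = (c:Int) := by
            have := (List.mem_filter.mp hyf).2
            exact_mod_cast of_decide_eq_true this
          have hlt : key y < key x := by
            rw [hyk, hkx]; exact_mod_cast hLOmem c hc
          rw [show PySem.List.insertBy (fun a b => decide (key b < key a)) x (y :: t)
              = if decide (key y < key x) then x :: y :: t else y :: PySem.List.insertBy (fun a b => decide (key b < key a)) x t from rfl]
          simp [hlt]
      rw [hLOlist]
      simp
    · intro a ha
      rw [List.mem_append] at ha
      have hka : ∃ c : ℕ, c0 ≤ c ∧ key a = (c:Int) := by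
        rcases ha with ha | ha
        · obtain ⟨c, hc, haf⟩ := List.mem_flatMap.mp ha
          refine ⟨c, le_of_lt (hHImem c hc), ?_⟩
          exact_mod_cast of_decide_eq_true (List.mem_filter.mp haf).2
        · exact ⟨c0, le_refl _, of_decide_eq_true (List.mem_filter.mp ha).2⟩
      obtain ⟨c, hcc, hkac⟩ := hka
      simp only [decide_eq_false_iff_not, not_lt, hkac, hkx]
      exact_mod_cast hcc

-- A's first phase: dict.fromkeys builds the distinct keys, in first-occurrence order
lemma fromkeys_items (ws : List String) :
    ∀ (s : List String) (d : PySem.Dict String Int),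
    d.items = s.map (fun w => (w, (0 : Int))) →
    (ws.foldl (fun d w => d.insert w 0) d).items
      = (PySem.Set.update s ws).map (fun w => (w, (0 : Int))) := by
  induction ws with
  | nil => intro s d h; simpa [PySem.Set.update] using h
  | cons w t ih =>
    intro s d h
    have hkeys : d.keys = s := by
      rw [PySem.Dict.keys, h, List.map_map]
      have hid : ((fun (x : String × Int) => x.1) ∘ fun w => (w, (0:Int))) = id := rfl
      rw [hid, List.map_id]
    by_cases hw : w ∈ s
    · have hc : d.contains w = true := by
        rw [PySem.Dict.contains_iff_mem_keys, hkeys]; exact hw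
      have hitems : (d.insert w 0).items = s.map (fun w => (w, (0 : Int))) := by
        rw [PySem.Dict.items_insert_of_contains d 0 hc, h]
        rw [List.map_map]
        apply List.map_congr_left
        intro a _
        by_cases haw : (a == w) = true
        · simp only [Function.comp, haw, if_pos]
          simp [(eq_of_beq haw).symm]
        · simp [Function.comp, haw]
      have hadd : PySem.Set.add s w = s := by
        have hct : PySem.Set.contains s w = true := (PySem.Set.contains_iff s w).mpr hw
        unfold PySem.Set.add
        rw [if_pos hct]
      have := ih s (d.insert w 0) hitems
      simpa [PySem.Set.update, hadd] using this
    · have hc : d.contains w = false := by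
        rw [Bool.eq_false_iff]
        intro hcon
        exact hw (hkeys ▸ (PySem.Dict.contains_iff_mem_keys d w).mp hcon)
      have hitems : (d.insert w 0).items = (s ++ [w]).map (fun w => (w, (0 : Int))) := by
        rw [PySem.Dict.items_insert_of_not_contains d 0 hc, h]; simp
      have hadd : PySem.Set.add s w = s ++ [w] := by
        have hct : ¬ (PySem.Set.contains s w = true) := fun hc' => hw ((PySem.Set.contains_iff _ _).mp hc')
        unfold PySem.Set.add
        rw [if_neg hct]
      have := ih (s ++ [w]) (d.insert w 0) hitems
      simpa [PySem.Set.update, hadd] using this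

-- A's inner loop over documents for a fixed word i: only i's entry changes, by
-- the number of documents containing i
lemma innerA_items (docs : List String) (i : String) :
    ∀ (v : Int) (pre post : List (String × Int)) (d : PySem.Dict String Int),
    d.items = pre ++ (i, v) :: post →
    (∀ p ∈ pre, (p.1 == i) = false) → (∀ p ∈ post, (p.1 == i) = false) →
    (docs.foldl (fun d j => if PySem.Str.isIn i j then d.insert i (d.getD i 0 + 1) else d) d).items
      = pre ++ (i, v + (docs.countP (fun j => PySem.Str.isIn i j) : Int)) :: post := by
  induction docs with
  | nil => intro v pre post d h _ _; simpa using h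
  | cons j t ih =>
    intro v pre post d h hpre hpost
    simp only [List.foldl_cons]
    by_cases hj : PySem.Str.isIn i j = true
    · have hget : d.getD i 0 = v := by
        have : d.get? i = some v := by
          simp only [PySem.Dict.get?, h, List.find?_append]
          rw [List.find?_eq_none.mpr (fun p hp => by simp [hpre p hp])]
          simp
        simp [PySem.Dict.getD, this]
      have hc : d.contains i = true := by
        rw [PySem.Dict.contains_iff_mem_keys]
        simp [PySem.Dict.keys, h]
      have hitems : (d.insert i (d.getD i 0 + 1)).items = pre ++ (i, v + 1) :: post := by
        rw [PySem.Dict.items_insert_of_contains d _ hc, h, hget]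
        rw [List.map_append, List.map_cons]
        congr 1
        · conv_rhs => rw [← List.map_id pre]
          apply List.map_congr_left; intro p hp; simp [hpre p hp]
        · congr 1
          · simp
          · conv_rhs => rw [← List.map_id post]
            apply List.map_congr_left; intro p hp; simp [hpost p hp]
      rw [if_pos hj]
      rw [ih (v+1) pre post _ hitems hpre hpost]
      have : (v + 1) + (t.countP (fun j => PySem.Str.isIn i j) : Int)
          = v + (((j :: t).countP (fun j => PySem.Str.isIn i j) : ℕ) : Int) := by
        rw [List.countP_cons, if_pos hj]
        push_cast; ring
      rw [this]
    · rw [if_neg hj]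
      rw [ih v pre post d h hpre hpost]
      have : (t.countP (fun j => PySem.Str.isIn i j) : Int)
          = (((j :: t).countP (fun j => PySem.Str.isIn i j) : ℕ) : Int) := by
        rw [List.countP_cons, if_neg hj, Nat.add_zero]
      rw [this]

-- A's outer loop over the distinct words: every entry gets its own document count
lemma outerA_items (docs : List String) (ks : List String) :
    ∀ (pre : List (String × Int)) (f : String → Int) (d : PySem.Dict String Int),
    ks.Nodup → d.items = pre ++ ks.map (fun w => (w, f w)) →
    (∀ p ∈ pre, p.1 ∉ ks) →
    (ks.foldl (fun d i =>
        docs.foldl (fun d j => if PySem.Str.isIn i j then d.insert i (d.getD i 0 + 1) else d) d) d).items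
      = pre ++ ks.map (fun w => (w, f w + (docs.countP (fun j => PySem.Str.isIn w j) : Int))) := by
  induction ks with
  | nil => intro pre f d _ h _; simpa using h
  | cons k t ih =>
    intro pre f d hnd h hpre
    simp only [List.foldl_cons]
    obtain ⟨hkt, hndt⟩ := List.nodup_cons.mp hnd
    have h1 := innerA_items docs k (f k) pre (t.map (fun w => (w, f w))) d
      (by simpa using h)
      (fun p hp => by
        have hnk := hpre p hp
        simp only [List.mem_cons, not_or] at hnk
        simp [hnk.1])
      (fun p hp => by
        obtain ⟨w, hw, rfl⟩ := List.mem_map.mp hp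
        rw [beq_eq_false_iff_ne]
        exact fun e => hkt (e ▸ hw))
    have h2 := ih (pre ++ [(k, f k + (docs.countP (fun j => PySem.Str.isIn k j) : Int))]) f _ hndt
      (by rw [h1]; simp)
      (fun p hp => by
        rcases List.mem_append.mp hp with hp | hp
        · have := hpre p hp
          simp only [List.mem_cons, not_or] at this
          exact this.2
        · simp only [List.mem_singleton] at hp
          subst hp
          exact hkt)
    rw [h2]
    simp

lemma portA_eq_canon (words documents : List String) (nameOfRetailer : String) :
    getTheRelevantWords words documents nameOfRetailer = pvCanon words documents := by
  have hdef : getTheRelevantWords words documents nameOfRetailer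
      = (PySem.List.sorted ((PySem.Set.ofList words).foldl (fun d i =>
            documents.foldl (fun d j =>
              if PySem.Str.isIn i j then d.insert i (d.getD i 0 + 1) else d) d)
          (words.foldl (fun d w => d.insert w 0)
            (PySem.Dict.empty : PySem.Dict String Int))).items
          (fun item => item.2) true).map (fun p => p.1) := by rfl
  rw [hdef]
  have h0 : (words.foldl (fun d w => d.insert w 0) PySem.Dict.empty).items
      = (PySem.Set.ofList words).map (fun w => (w, (0:Int))) := by
    have := fromkeys_items words [] PySem.Dict.empty (by rfl)
    rw [this, PySem.Set.update_nil_left]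
  have h1 : ((PySem.Set.ofList words).foldl (fun d i =>
        documents.foldl (fun d j =>
          if PySem.Str.isIn i j then d.insert i (d.getD i 0 + 1) else d) d)
      (words.foldl (fun d w => d.insert w 0) PySem.Dict.empty)).items
      = (PySem.Set.ofList words).map (fun w => (w, ((pvCntN documents w : ℕ) : Int))) := by
    have := outerA_items documents (PySem.Set.ofList words) [] (fun _ => (0:Int)) _
      (PySem.Set.nodup_ofList words) (by rw [h0]; rfl) (by simp)
    rw [this]
    simp [pvCntN]
  have h2 := sorted_rev_buckets (fun (item : String × Int) => item.2) (documents.length + 1)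
      ((PySem.Set.ofList words).map (fun w => (w, ((pvCntN documents w : ℕ) : Int))))
      (by
        intro x hx
        obtain ⟨w, hw, rfl⟩ := List.mem_map.mp hx
        exact ⟨pvCntN documents w, Nat.lt_succ_of_le (pvCntN_le documents w), rfl⟩)
  rw [h1, h2, pvCanon, List.map_flatMap]
  apply List.flatMap_congr
  intro c hc
  rw [List.filter_map, List.map_map]
  have hcomp : ((fun p : String × Int => p.1) ∘ fun w => (w, ((pvCntN documents w : ℕ) : Int)))
      = id := rfl
  rw [hcomp, List.map_id]
  apply List.filter_congr
  intro w hw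
  simp [Nat.cast_inj]

-- B's bucket loop: bucket c collects, in order, the words contained in exactly c documents
lemma bucketsB (documents : List String) (order : List String) :
    ∀ (g : ℕ → List String),
    (order.foldl (fun bs w =>
        PySem.List.pySetD bs (pvCount documents w)
          (PySem.List.pyGetD bs (pvCount documents w) [] ++ [w]))
      ((List.range (documents.length + 1)).map g))
    = (List.range (documents.length + 1)).map
        (fun c => g c ++ order.filter (fun w => pvCntN documents w = c)) := by
  induction order with
  | nil => intro g; simp
  | cons w t ih =>
    intro g
    simp only [List.foldl_cons]
    have hlt : pvCntN documents w < documents.length + 1 :=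
      Nat.lt_succ_of_le (pvCntN_le documents w)
    rw [pvCount_eq, PySem.List.pyGetD_natCast, PySem.List.pySetD_natCast]
    have hget : ((List.range (documents.length + 1)).map g).getD (pvCntN documents w) []
        = g (pvCntN documents w) := by
      rw [List.getD_eq_getElem _ _ (by simpa using hlt)]
      simp
    have hset : ((List.range (documents.length + 1)).map g).set (pvCntN documents w)
          (g (pvCntN documents w) ++ [w])
        = (List.range (documents.length + 1)).map
            (fun c => if c = pvCntN documents w then g c ++ [w] else g c) := by
      apply List.ext_getElem
      · simp
      · intro i h1 h2
        rw [List.getElem_set]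
        simp only [List.getElem_map, List.getElem_range]
        by_cases hi : pvCntN documents w = i
        · simp [hi]
        · simp [hi]; omega
    rw [hget, hset, ih]
    apply List.map_congr_left
    intro c _
    rw [List.filter_cons]
    by_cases hc : pvCntN documents w = c
    · subst hc
      simp
    · simp [hc]; intro e; exact absurd e.symm hc

lemma portB_eq_canon (words documents : List String) (nameOfRetailer : String) :
    getTheRelevantWords_alt words documents nameOfRetailer = pvCanon words documents := by
  have hdef : getTheRelevantWords_alt words documents nameOfRetailer
      = (((PySem.List.dedup words).foldl (fun bs w =>
            PySem.List.pySetD bs (pvCount documents w)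
              (PySem.List.pyGetD bs (pvCount documents w) [] ++ [w]))
          ((List.range (documents.length + 1)).map (fun _ => []))).reverse).foldl
          (fun out b => out ++ b) [] := by rfl
  rw [hdef, PySem.List.dedup_eq_ofList]
  rw [bucketsB documents (PySem.Set.ofList words) (fun _ => [])]
  simp only [List.nil_append]
  rw [← List.map_reverse]
  rw [PySem.List.foldl_append_eq_flatMap (fun b => b)]
  rw [List.flatMap_map]
  rfl

-- ===== VERDICT (by name: the statement is the Claim_ definition above) =====
theorem getTheRelevantWords_spec : Claim_equal_getTheRelevantWords := by
  intro words documents nameOfRetailer _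
  unfold Spec_getTheRelevantWords
  rw [portA_eq_canon words documents nameOfRetailer, portB_eq_canon words documents nameOfRetailer]
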